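-- pv_equiv track=rewrite | github.com/kirdmiv/Code-andother-stuff | lKSH/final/hoca.py | hodga
-- ===== SOURCE A (Python) =====
-- def hodga(n):
--     matrix = [[0] * n for i in range(n)]
--     for i in range(n):
--         for j in range(n):
--             if i == 0 and j == 0:
--                 matrix[0][0] = 1
--             elif i > 0 and j > 0:
--                 matrix[i][j] = matrix[i - 1][j] + matrix[i][j - 1]
--             elif j == 0:
--                 matrix[i][0] = matrix[i - 1][0]
--             elif i == 0:
--                 matrix[0][j] = matrix[0][j - 1]
--     matrix[0][0] = 0
--     return matrix
-- ===== SOURCE B (Python) =====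
-- def hodga(n):
--     matrix = []
--     for i in range(n):
--         row = [1]
--         for j in range(1, n):
--             row.append(row[-1] * (i + j) // j)
--         matrix.append(row)
--     matrix[0][0] = 0
--     return matrix
-- ===== Notes on version B (the rewrite author's own statement) =====
-- stated objective: alternative
-- what changed: Replaced the in-place Pascal-triangle DP (each cell summed from its two already-computed neighbours in a preallocated mutable n×n matrix) by the closed form: each row is built independently, left to right, as the binomial coefficients C(i+j,i) via the multiplicative ratio row[-1]*(i+j)//j.
import Mathlib
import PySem

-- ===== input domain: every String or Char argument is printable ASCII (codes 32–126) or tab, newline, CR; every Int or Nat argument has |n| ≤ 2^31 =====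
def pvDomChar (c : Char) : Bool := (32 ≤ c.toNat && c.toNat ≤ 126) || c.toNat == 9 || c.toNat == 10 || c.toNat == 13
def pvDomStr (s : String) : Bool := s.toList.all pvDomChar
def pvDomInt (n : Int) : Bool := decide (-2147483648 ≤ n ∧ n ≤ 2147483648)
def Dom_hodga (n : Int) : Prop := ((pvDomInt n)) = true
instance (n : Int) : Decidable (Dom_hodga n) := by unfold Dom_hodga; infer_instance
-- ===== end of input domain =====

-- B replaces A's in-place Pascal-triangle DP by computing each cell independently as the
-- binomial coefficient C(i+j, i) (multiplicative product); alternative algorithm, not claimed faster.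

-- ===== PORT A =====
def hodga (n : Int) : List (List Int) :=
  let m0 : List (List Int) := (PySem.List.pyRange 0 n 1).map (fun _ => List.replicate n.toNat (0:Int))
  let m1 := (PySem.List.pyRange 0 n 1).foldl (fun m i =>
      (PySem.List.pyRange 0 n 1).foldl (fun m j =>
        if i = 0 ∧ j = 0 then
          PySem.List.pySetD m 0 (PySem.List.pySetD (PySem.List.pyGetD m 0 []) 0 1)
        else if 0 < i ∧ 0 < j then
          PySem.List.pySetD m i (PySem.List.pySetD (PySem.List.pyGetD m i []) j
            (PySem.List.pyGetD (PySem.List.pyGetD m (i-1) []) j 0 +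
             PySem.List.pyGetD (PySem.List.pyGetD m i []) (j-1) 0))
        else if j = 0 then
          PySem.List.pySetD m i (PySem.List.pySetD (PySem.List.pyGetD m i []) 0
            (PySem.List.pyGetD (PySem.List.pyGetD m (i-1) []) 0 0))
        else if i = 0 then
          PySem.List.pySetD m 0 (PySem.List.pySetD (PySem.List.pyGetD m 0 []) j
            (PySem.List.pyGetD (PySem.List.pyGetD m 0 []) (j-1) 0))
        else m) m) m0
  PySem.List.pySetD m1 0 (PySem.List.pySetD (PySem.List.pyGetD m1 0 []) 0 0)

-- ===== PORT B =====
-- port of Source B: each row is built left-to-right by the binomial ratio row[-1] * (i + j) // j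
def hodga_alt (n : Int) : List (List Int) :=
  let m := (PySem.List.pyRange 0 n 1).foldl (fun matrix i =>
      matrix ++ [(PySem.List.pyRange 1 n 1).foldl
        (fun row j => row ++ [PySem.Int.floordiv ((PySem.List.pyGetD row (-1) 0) * (i + j)) j])
        [1]]) []
  PySem.List.pySetD m 0 (PySem.List.pySetD (PySem.List.pyGetD m 0 []) 0 0)

-- ===== PRECONDITION & SPEC =====
-- Pre_ excludes non-positive n: there the built matrix is empty and the final write to its
-- top-left cell raises IndexError in A (and likewise in B).
def Pre_hodga (n : Int) : Prop := 1 ≤ n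
instance (n : Int) : Decidable (Pre_hodga n) := by unfold Pre_hodga; infer_instance
def pvWitness_hodga : Int := (3)

def Spec_hodga (n : Int) (out : List (List Int)) : Prop := out = hodga_alt n
instance (n : Int) (out : List (List Int)) : Decidable (Spec_hodga n out) := by unfold Spec_hodga; infer_instance

-- ===== CLAIM (what is proved, stated in full; the proofs are below) =====
def Claim_equal_hodga : Prop := ∀ (n : Int), Dom_hodga n → Pre_hodga n → Spec_hodga n (hodga n)

-- ===== LEMMAS AND PROOFS =====

-- target cell value: C(i+j, i)
def pvT (i j : Nat) : Int := ((i+j).choose i : Nat)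
-- fully computed row i of an N×N matrix
def pvTrow (N i : Nat) : List Int := (List.range N).map (pvT i)
-- row i after the inner loop has processed columns 0..t-1
def pvProw (N i t : Nat) : List Int := (List.range N).map (fun j => if j < t then pvT i j else 0)
-- Nat-indexed form of A's loop body
def pvStep (i j : Nat) (m : List (List Int)) : List (List Int) :=
  if i = 0 ∧ j = 0 then m.set 0 ((m.getD 0 []).set 0 1)
  else if 0 < i ∧ 0 < j then
    m.set i ((m.getD i []).set j ((m.getD (i-1) []).getD j 0 + (m.getD i []).getD (j-1) 0))
  else if j = 0 then m.set i ((m.getD i []).set 0 ((m.getD (i-1) []).getD 0 0))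
  else if i = 0 then m.set 0 ((m.getD 0 []).set j ((m.getD 0 []).getD (j-1) 0))
  else m
-- matrix after the outer loop has processed rows 0..r-1
def pvMat (N r : Nat) : List (List Int) :=
  (List.range N).map (fun i => if i < r then pvTrow N i else List.replicate N 0)

theorem pv_getD_set_self {α : Type} (l : List α) (i : Nat) (a d : α) (h : i < l.length) :
    (l.set i a).getD i d = a := by
  simp [List.getD_eq_getElem?_getD, List.getElem?_set_self h]

theorem pv_getD_set_ne {α : Type} (l : List α) {i j : Nat} (h : i ≠ j) (a d : α) :
    (l.set i a).getD j d = l.getD j d := by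
  simp [List.getD_eq_getElem?_getD, List.getElem?_set_ne h]

theorem pv_choose_symm_add (i s : Nat) : (i+s).choose i = (i+s).choose s := by
  have h := Nat.choose_symm (Nat.le_add_right i s)
  rw [show i+s-i = s by omega] at h
  exact h.symm

theorem pv_ratio (i s : Nat) :
    PySem.Int.floordiv (pvT i s * ((i:Int) + (s:Int) + 1)) ((s:Int)+1) = pvT i (s+1) := by
  have h' : (i+s).choose i * (i+(s+1)) = (i+(s+1)).choose i * (s+1) := by
    calc (i+s).choose i * (i+(s+1)) = (i+s+1) * (i+s).choose s := by
          rw [pv_choose_symm_add]; ring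
      _ = (i+s+1).choose (s+1) * (s+1) := by
          simpa [Nat.succ_eq_add_one] using Nat.succ_mul_choose_eq (i+s) s
      _ = (i+(s+1)).choose i * (s+1) :=
          congrArg (· * (s+1)) (pv_choose_symm_add i (s+1)).symm
  have hmul : pvT i s * ((i:Int) + (s:Int) + 1) = pvT i (s+1) * ((s:Int)+1) := by
    unfold pvT; exact_mod_cast h'
  rw [hmul, PySem.Int.floordiv_eq_ediv_of_pos (by omega : (0:Int) < (s:Int)+1),
    Int.mul_ediv_cancel _ (by omega : ((s:Int)+1) ≠ 0)]

theorem pv_rowB (i : Nat) : ∀ t : Nat, 1 ≤ t →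
    (PySem.List.pyRange 1 (t:Int) 1).foldl
      (fun row j => row ++ [PySem.Int.floordiv ((PySem.List.pyGetD row (-1) 0) * ((i:Int) + j)) j])
      [1] = (List.range t).map (pvT i) := by
  intro t
  induction t with
  | zero => omega
  | succ t ih =>
      intro _
      rcases Nat.eq_zero_or_pos t with ht | ht
      · subst ht
        rw [show ((1:Nat):Int) = 1 by rfl, PySem.List.pyRange_one_eq_nil (by omega)]
        simp [pvT]
      · rw [show ((t+1:Nat):Int) = (t:Int) + 1 by omega,
          PySem.List.pyRange_one_succ_right (by omega : (1:Int) ≤ (t:Int)),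
          List.foldl_append, ih ht]
        simp only [List.foldl_cons, List.foldl_nil]
        have hne : (List.range t).map (pvT i) ≠ [] := by
          simp [List.map_eq_nil_iff, List.range_eq_nil]; omega
        rw [PySem.List.pyGetD_neg_one _ 0 hne]
        have hlast : ((List.range t).map (pvT i)).getLast hne = pvT i (t-1) := by
          rw [List.getLast_eq_getElem]
          simp [show (List.range t).length = t from List.length_range]
        rw [hlast]
        obtain ⟨s, rfl⟩ : ∃ s, t = s+1 := ⟨t-1, by omega⟩
        rw [show ((s+1:Nat):Int) = (s:Int) + 1 by omega, Nat.add_sub_cancel,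
          show (i:Int) + ((s:Int)+1) = (i:Int) + (s:Int) + 1 by ring, pv_ratio]
        rw [show List.range (s+1+1) = List.range (s+1) ++ [s+1] from List.range_succ]
        simp

theorem pv_step_cast (i j : Nat) (m : List (List Int)) :
    (if (i:Int) = 0 ∧ (j:Int) = 0 then
        PySem.List.pySetD m 0 (PySem.List.pySetD (PySem.List.pyGetD m 0 []) 0 1)
      else if 0 < (i:Int) ∧ 0 < (j:Int) then
        PySem.List.pySetD m i (PySem.List.pySetD (PySem.List.pyGetD m i []) j
          (PySem.List.pyGetD (PySem.List.pyGetD m ((i:Int)-1) []) j 0 +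
           PySem.List.pyGetD (PySem.List.pyGetD m i []) ((j:Int)-1) 0))
      else if (j:Int) = 0 then
        PySem.List.pySetD m i (PySem.List.pySetD (PySem.List.pyGetD m i []) 0
          (PySem.List.pyGetD (PySem.List.pyGetD m ((i:Int)-1) []) 0 0))
      else if (i:Int) = 0 then
        PySem.List.pySetD m 0 (PySem.List.pySetD (PySem.List.pyGetD m 0 []) j
          (PySem.List.pyGetD (PySem.List.pyGetD m 0 []) ((j:Int)-1) 0))
      else m) = pvStep i j m := by
  have p0 : ∀ {α : Type} (xs : List α) (v : α), PySem.List.pySetD xs 0 v = xs.set 0 v :=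
    fun xs v => PySem.List.pySetD_natCast xs 0 v
  have q0 : ∀ {α : Type} (xs : List α) (d : α), PySem.List.pyGetD xs 0 d = xs.getD 0 d :=
    fun xs d => PySem.List.pyGetD_natCast xs 0 d
  unfold pvStep
  by_cases hi : i = 0 <;> by_cases hj : j = 0
  · subst hi; subst hj; simp [pysem]
  · subst hi
    rw [show ((j:Nat):Int) - 1 = ((j-1:Nat):Int) by omega]
    simp only [p0, q0, PySem.List.pySetD_natCast, PySem.List.pyGetD_natCast]
    simp [hj]
  · subst hj
    have hi' : 0 < i := Nat.pos_of_ne_zero hi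
    rw [show ((i:Nat):Int) - 1 = ((i-1:Nat):Int) by omega]
    simp only [p0, q0, PySem.List.pySetD_natCast, PySem.List.pyGetD_natCast]
    simp [hi]
  · have hi' : 0 < i := Nat.pos_of_ne_zero hi
    have hj' : 0 < j := Nat.pos_of_ne_zero hj
    rw [show ((i:Nat):Int) - 1 = ((i-1:Nat):Int) by omega,
       show ((j:Nat):Int) - 1 = ((j-1:Nat):Int) by omega]
    simp only [p0, q0, PySem.List.pySetD_natCast, PySem.List.pyGetD_natCast]
    simp [hi, hj, hi', hj']

theorem pv_prow_zero (N i : Nat) : pvProw N i 0 = List.replicate N 0 := by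
  simp [pvProw, List.map_const']

theorem pv_prow_full (N i : Nat) : pvProw N i N = pvTrow N i := by
  unfold pvProw pvTrow
  exact List.map_congr_left (fun j hj => by simp [List.mem_range.mp hj])

theorem pv_prow_set (N i t : Nat) (ht : t < N) :
    (pvProw N i t).set t (pvT i t) = pvProw N i (t+1) := by
  apply List.ext_getElem (by simp [pvProw])
  intro k h1 h2
  have hk : k < N := by simpa [pvProw] using h2
  rw [List.getElem_set]
  by_cases hkt : t = k
  · subst hkt; simp [pvProw]
  · simp only [if_neg hkt, pvProw, List.getElem_map, List.getElem_range]
    have : k < t ↔ k < t + 1 := by omega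
    simp [this]

theorem pv_T_pascal (i j : Nat) :
    pvT (i+1) (j+1) = pvT i (j+1) + pvT (i+1) j := by
  unfold pvT
  have h : (i+1+(j+1)) = (i+j+1)+1 := by ring
  rw [h, Nat.choose_succ_succ (i+j+1) i]
  push_cast [show i+(j+1) = i+j+1 by ring, show (i+1)+j = i+j+1 by ring]
  ring

theorem pv_T_left (i : Nat) : pvT i 0 = 1 := by simp [pvT]
theorem pv_T_top (j : Nat) : pvT 0 j = 1 := by simp [pvT]

theorem pv_inner (N i : Nat) (hiN : i < N) (m : List (List Int))
    (hlen : m.length = N)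
    (hprev : 0 < i → m.getD (i-1) [] = pvTrow N (i-1))
    (hcur : m.getD i [] = List.replicate N 0) :
    ∀ t, t ≤ N →
      (List.range t).foldl (fun m j => pvStep i j m) m = m.set i (pvProw N i t) := by
  intro t
  induction t with
  | zero =>
      intro _
      rw [pv_prow_zero, ← hcur]
      have hi' : i < m.length := by omega
      have hgd : m.getD i [] = m[i] := by
        simp [List.getD_eq_getElem?_getD, List.getElem?_eq_getElem hi']
      rw [hgd, List.set_getElem_self]
      simp
  | succ t ih =>
      intro ht
      have htN : t < N := by omega
      rw [List.range_succ, List.foldl_append, ih (by omega)]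
      simp only [List.foldl_cons, List.foldl_nil]
      have hset : i < m.length := by omega
      have hMi : (m.set i (pvProw N i t)).getD i [] = pvProw N i t :=
        pv_getD_set_self m i _ [] hset
      have hMprev : 0 < i → (m.set i (pvProw N i t)).getD (i-1) [] = pvTrow N (i-1) := by
        intro hi
        rw [pv_getD_set_ne m (by omega) _ []]
        exact hprev hi
      unfold pvStep
      rcases Nat.eq_zero_or_pos i with hi | hi
      · subst hi
        rcases Nat.eq_zero_or_pos t with htz | htz
        · subst htz
          rw [if_pos ⟨rfl, rfl⟩, hMi, List.set_set,
            show (1:Int) = pvT 0 0 by simp [pvT],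
            pv_prow_set N 0 0 (by omega)]
        · rw [if_neg (by omega), if_neg (by omega), if_neg (by omega : ¬ t = 0), if_pos rfl,
            hMi, List.set_set]
          have hval : (pvProw N 0 t).getD (t-1) 0 = pvT 0 (t-1) := by
            unfold pvProw
            rw [PySem.List.getD_map_range _ _ _ _ (by omega)]
            simp [show t-1 < t by omega]
          rw [hval, show pvT 0 (t-1) = pvT 0 t by simp [pv_T_top], pv_prow_set N 0 t htN]
      · rcases Nat.eq_zero_or_pos t with htz | htz
        · subst htz
          rw [if_neg (by omega), if_neg (by omega), if_pos rfl, hMi, hMprev hi, List.set_set]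
          have hval : (pvTrow N (i-1)).getD 0 0 = pvT (i-1) 0 := by
            unfold pvTrow
            exact PySem.List.getD_map_range _ _ _ _ (by omega)
          rw [hval, show pvT (i-1) 0 = pvT i 0 by simp [pv_T_left],
            pv_prow_set N i 0 (by omega)]
        · rw [if_neg (by omega), if_pos ⟨hi, htz⟩, hMi, hMprev hi, List.set_set]
          have hv1 : (pvTrow N (i-1)).getD t 0 = pvT (i-1) t := by
            unfold pvTrow
            exact PySem.List.getD_map_range _ _ _ _ (by omega)
          have hv2 : (pvProw N i t).getD (t-1) 0 = pvT i (t-1) := by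
            unfold pvProw
            rw [PySem.List.getD_map_range _ _ _ _ (by omega)]
            simp [show t-1 < t by omega]
          rw [hv1, hv2]
          have hval : pvT (i-1) t + pvT i (t-1) = pvT i t := by
            obtain ⟨i', rfl⟩ : ∃ i', i = i'+1 := ⟨i-1, by omega⟩
            obtain ⟨t', rfl⟩ : ∃ t', t = t'+1 := ⟨t-1, by omega⟩
            simp only [Nat.add_sub_cancel]
            rw [pv_T_pascal]
          rw [hval, pv_prow_set N i t htN]

theorem pv_mat_getD (N r k : Nat) (hk : k < N) :
    (pvMat N r).getD k [] = if k < r then pvTrow N k else List.replicate N 0 := by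
  unfold pvMat
  exact PySem.List.getD_map_range _ _ _ _ hk

theorem pv_mat_set (N r : Nat) (hr : r < N) :
    (pvMat N r).set r (pvTrow N r) = pvMat N (r+1) := by
  apply List.ext_getElem (by simp [pvMat])
  intro k h1 h2
  have hk : k < N := by simpa [pvMat] using h2
  rw [List.getElem_set]
  by_cases hkr : r = k
  · subst hkr; simp [pvMat]
  · simp only [if_neg hkr, pvMat, List.getElem_map, List.getElem_range]
    have : k < r ↔ k < r + 1 := by omega
    simp [this]

theorem pv_outer (N : Nat) : ∀ r, r ≤ N →
    (List.range r).foldl (fun m i => (List.range N).foldl (fun m j => pvStep i j m) m)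
      (List.replicate N (List.replicate N 0)) = pvMat N r := by
  intro r
  induction r with
  | zero =>
      intro _
      simp [pvMat, List.map_const']
  | succ r ih =>
      intro hr
      rw [List.range_succ, List.foldl_append, ih (by omega)]
      simp only [List.foldl_cons, List.foldl_nil]
      rw [pv_inner N r (by omega) (pvMat N r) (by simp [pvMat])
        (fun hr0 => by rw [pv_mat_getD N r (r-1) (by omega)]; simp [show r-1 < r by omega])
        (by rw [pv_mat_getD N r r (by omega)]; simp)
        N (le_refl N)]
      rw [pv_prow_full, pv_mat_set N r (by omega)]

theorem pv_mat_full (N : Nat) : pvMat N N = (List.range N).map (pvTrow N) := by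
  unfold pvMat
  exact List.map_congr_left (fun i hi => by simp [List.mem_range.mp hi])

theorem pv_pyRange_cast (n : Int) :
    PySem.List.pyRange 0 n 1 = (List.range n.toNat).map (fun k => ((k:Nat):Int)) := by
  rw [PySem.List.pyRange_one]
  simp

theorem hodga_spec : Claim_equal_hodga := by
  unfold Claim_equal_hodga
  intro n _ hpre
  have hN1 : 1 ≤ n.toNat := by unfold Pre_hodga at hpre; omega
  unfold Spec_hodga hodga hodga_alt
  rw [pv_pyRange_cast,
    show PySem.List.pyRange 1 n 1 = PySem.List.pyRange 1 ((n.toNat:Nat):Int) 1 from by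
      rw [show ((n.toNat:Nat):Int) = n by omega]]
  simp only [List.foldl_map, List.map_map, Function.comp_def]
  rw [show (List.range n.toNat).map (fun _ => List.replicate n.toNat (0:Int))
        = List.replicate n.toNat (List.replicate n.toNat 0) from by simp [List.map_const']]
  simp only [pv_step_cast]
  rw [pv_outer n.toNat n.toNat (le_refl _), pv_mat_full]
  rw [PySem.List.foldl_append_singleton_eq_map]
  rw [List.map_congr_left (fun i _ => pv_rowB i n.toNat hN1)]
  rfl
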